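-- pv_equiv track=rewrite | github.com/kienpt1/Searching- | Realease_Web.py | auto_format_number
-- ===== SOURCE A (Python) =====
-- def auto_format_number(number):
--     # Convert number to string, but only take the integer part by splitting at the decimal point
--     number_str = str(int(number))  # This will remove the decimal part
--
--     # Get the length of the number
--     length = len(number_str)
--
--     # Define the patterns based on the length of the number
--     patterns = {
--         4: [1, 3, 2],
--         5: [2, 3, 2],
--         6: [3, 3, 2],
--         7: [1, 3, 3, 2],
--         8: [2, 3, 3, 2],
--         9: [3, 3, 3, 2],
--         10: [1, 3, 3, 3, 2],
--         11: [2, 3, 3, 3, 2],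
--         12: [3, 3, 3, 3, 2],
--         13: [1, 3, 3, 3, 3, 2],
--         14: [2, 3, 3, 3, 3, 2],
--         15: [3, 3, 3, 3, 3, 2],
--         16: [1, 3, 3, 3, 3, 3, 2],
--     }
--
--     # Check if the length of the number matches one of the patterns
--     if length not in patterns:
--         return "Invalid number"
--
--     # Get the pattern for this number
--     parts = patterns[length]
--
--     # Split the number into parts based on the pattern
--     formatted = []
--     start = 0
--     for part in parts:
--         formatted.append(number_str[start:start + part])
--         start += part
--
--     # Join the formatted parts with dots
--     formatted_number = ".".join(formatted)
--
--     return formatted_number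
-- ===== SOURCE B (Python) =====
-- def auto_format_number(number):
--     # Right-to-left single pass (thousands-separator style): no group-width
--     # table and no slicing.  Walk the reversed digit string once with a small
--     # counter, emitting a dot after every third character from the end, then
--     # reverse what was built and append the final dot (A's overrunning
--     # trailing empty group).
--     s = str(int(number))
--     if len(s) < 4 or len(s) > 16:
--         return "Invalid number"
--     out = []
--     k = 0
--     for ch in reversed(s):
--         if k == 3:
--             out.append('.')
--             k = 0
--         out.append(ch)
--         k += 1
--     out.reverse()
--     out.append('.')
--     return ''.join(out)
-- ===== Notes on version B (the rewrite author's own statement) =====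
-- stated objective: simpler
-- what changed: Replaced the length-to-pattern lookup table and the left-to-right pattern-driven slicing fold by a single right-to-left pass over the reversed digit string that emits a dot before every third character from the end, then reverses the accumulator and appends the trailing dot.
import Mathlib
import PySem

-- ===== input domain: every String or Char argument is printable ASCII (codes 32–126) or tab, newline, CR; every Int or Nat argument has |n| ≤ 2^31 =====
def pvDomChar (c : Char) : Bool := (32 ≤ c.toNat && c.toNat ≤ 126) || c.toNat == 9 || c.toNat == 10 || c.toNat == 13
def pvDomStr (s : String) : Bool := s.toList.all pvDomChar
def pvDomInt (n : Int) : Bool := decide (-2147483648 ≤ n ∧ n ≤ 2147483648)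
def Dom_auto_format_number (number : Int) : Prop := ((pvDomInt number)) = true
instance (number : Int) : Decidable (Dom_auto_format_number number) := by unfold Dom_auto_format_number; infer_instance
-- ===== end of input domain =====

-- B replaces A's 13-entry length→pattern table and left-to-right slicing fold by one
-- right-to-left pass over the reversed digits with a small counter, emitting a dot after
-- every third character from the end, then reversing and appending the trailing dot
-- (objective: simpler).  Proved equal for EVERY Int (no Pre_).

-- ===== PORT A =====
-- Ported on List Char (PySem.Chars are the definitions behind PySem.Str, value-identical).
def pvBodyA (number_str : List Char) : String :=
  let length : Int := (number_str.length : Int)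
  let patterns : PySem.Dict Int (List Int) := PySem.Dict.ofList
    [(4,[1,3,2]),(5,[2,3,2]),(6,[3,3,2]),(7,[1,3,3,2]),(8,[2,3,3,2]),(9,[3,3,3,2]),
     (10,[1,3,3,3,2]),(11,[2,3,3,3,2]),(12,[3,3,3,3,2]),(13,[1,3,3,3,3,2]),
     (14,[2,3,3,3,3,2]),(15,[3,3,3,3,3,2]),(16,[1,3,3,3,3,3,2])]
  match PySem.Dict.get? patterns length with
  | none => "Invalid number"                      -- 'if length not in patterns'
  | some parts =>
    let st := parts.foldl
      (fun (acc : List (List Char) × Int) part =>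
        (acc.1 ++ [PySem.Chars.slice number_str (some acc.2) (some (acc.2 + part))], acc.2 + part))
      ([], 0)
    String.ofList (PySem.Chars.join ['.'] st.1)

def auto_format_number (number : Int) : String :=
  pvBodyA (PySem.Int.toChars number)

-- ===== PORT B =====
-- Literal port of Source B: a fold over reversed(s) carrying (out, k); 'if k == 3: out.append('.');
-- k = 0' then 'out.append(ch); k += 1'; finally out.reverse(), out.append('.'), ''.join(out).
def pvBodyB (cs : List Char) : String :=
  if cs.length < 4 ∨ 16 < cs.length then "Invalid number"
  else
    let st := cs.reverse.foldl
      (fun (acc : List Char × Int) ch =>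
        let acc' := if acc.2 = 3 then (acc.1 ++ ['.'], (0 : Int)) else acc
        (acc'.1 ++ [ch], acc'.2 + 1))
      ([], 0)
    String.ofList (st.1.reverse ++ ['.'])

def auto_format_number_alt (number : Int) : String :=
  pvBodyB (PySem.Int.toChars number)

-- ===== PRECONDITION & SPEC =====
def Spec_auto_format_number (number : Int) (out : String) : Prop := out = auto_format_number_alt number
instance (number : Int) (out : String) : Decidable (Spec_auto_format_number number out) := by unfold Spec_auto_format_number; infer_instance

-- ===== CLAIM (what is proved, stated in full; the proofs are below) =====
def Claim_equal_auto_format_number : Prop := ∀ (number : Int), Dom_auto_format_number number → Spec_auto_format_number number (auto_format_number number)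

-- ===== LEMMAS AND PROOFS =====

-- Closed form of B's fold: the chars emitted when scanning rs with the counter starting at k.
def pvClosedF : List Char → Int → List Char
  | [], _ => []
  | r :: rs, k => if k = 3 then '.' :: r :: pvClosedF rs 1 else r :: pvClosedF rs (k + 1)

theorem pvFold_closed (rs : List Char) : ∀ (out : List Char) (k : Int),
    (rs.foldl
      (fun (acc : List Char × Int) ch =>
        let acc' := if acc.2 = 3 then (acc.1 ++ ['.'], (0 : Int)) else acc
        (acc'.1 ++ [ch], acc'.2 + 1))
      (out, k)).1 = out ++ pvClosedF rs k := by
  induction rs with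
  | nil => intro out k; simp [pvClosedF]
  | cons r rs ih =>
    intro out k
    by_cases hk : k = 3 <;> simp [pvClosedF, hk, List.foldl_cons, ih]

-- the final output of the scan, read forward (before the trailing dot)
def pvOUT (cs : List Char) : List Char := (pvClosedF cs.reverse 0).reverse

theorem pvClosedF_three (rs : List Char) (h : rs ≠ []) :
    pvClosedF rs 3 = '.' :: pvClosedF rs 0 := by
  cases rs with
  | nil => exact absurd rfl h
  | cons r rs => simp [pvClosedF]

theorem pvOUT_short (cs : List Char) (h : cs.length ≤ 3) : pvOUT cs = cs := by
  match cs, h with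
  | [], _ => rfl
  | [a], _ => rfl
  | [a, b], _ => rfl
  | [a, b, c], _ => rfl

theorem pvOUT_step (ys : List Char) (a b c : Char) (h : ys ≠ []) :
    pvOUT (ys ++ [a, b, c]) = pvOUT ys ++ '.' :: [a, b, c] := by
  unfold pvOUT
  have hrev : ys.reverse ≠ [] := by simpa using h
  simp [pvClosedF, pvClosedF_three ys.reverse hrev]

-- peel the last three characters off
theorem pvOUT_peel (cs : List Char) (m : Nat) (h3 : 3 < cs.length) (hm : m = cs.length - 3) :
    pvOUT cs = pvOUT (cs.take m) ++ '.' :: cs.drop m := by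
  have hlen : (cs.drop m).length = 3 := by simp [hm]; omega
  match hzs : cs.drop m, hlen with
  | [a, b, c], _ =>
    have hne : cs.take m ≠ [] := by
      have : (cs.take m).length = m := by simp; omega
      intro hnil; rw [hnil] at this; simp at this; omega
    calc pvOUT cs = pvOUT (cs.take m ++ cs.drop m) := by rw [List.take_append_drop]
    _ = pvOUT (cs.take m ++ [a, b, c]) := by rw [hzs]
    _ = pvOUT (cs.take m) ++ '.' :: [a, b, c] := pvOUT_step _ a b c hne

-- staged expansion: j times, peel the last three characters (if more than three remain)
def pvSpec : Nat → List Char → List Char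
  | 0, cs => cs
  | j + 1, cs =>
    if cs.length ≤ 3 then cs
    else pvSpec j (cs.take (cs.length - 3)) ++ '.' :: cs.drop (cs.length - 3)

theorem pvOUT_expand : ∀ (j : Nat) (cs : List Char), cs.length ≤ 3 + 3 * j → 1 ≤ cs.length →
    pvOUT cs = pvSpec j cs := by
  intro j
  induction j with
  | zero => intro cs h1 h2; simpa [pvSpec] using pvOUT_short cs (by omega)
  | succ j ih =>
    intro cs h1 h2
    by_cases hs : cs.length ≤ 3
    · simp [pvSpec, hs, pvOUT_short cs hs]
    · rw [pvSpec, if_neg hs, pvOUT_peel cs (cs.length - 3) (by omega) rfl,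
        ih (cs.take (cs.length - 3)) (by simp; omega) (by simp; omega)]

theorem pv_main (cs : List Char) : pvBodyA cs = pvBodyB cs := by
  by_cases hinv : cs.length < 4 ∨ 16 < cs.length
  · unfold pvBodyA pvBodyB
    simp only [PySem.Dict.get?, PySem.Dict.ofList, PySem.Dict.update,
      PySem.Dict.empty, PySem.Dict.insert]
    rw [List.find?_eq_none.mpr (fun x hx => by fin_cases hx <;> simp <;> omega)]
    simp [hinv]
  · have hB : pvBodyB cs = String.ofList (pvOUT cs ++ ['.']) := by
      unfold pvBodyB
      rw [if_neg hinv]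
      simp only [pvFold_closed, List.nil_append, pvOUT]
    have hd : cs.length = 4 ∨ cs.length = 5 ∨ cs.length = 6 ∨ cs.length = 7 ∨ cs.length = 8 ∨
        cs.length = 9 ∨ cs.length = 10 ∨ cs.length = 11 ∨ cs.length = 12 ∨ cs.length = 13 ∨
        cs.length = 14 ∨ cs.length = 15 ∨ cs.length = 16 := by omega
    rw [hB]
    rcases hd with hk|hk|hk|hk|hk|hk|hk|hk|hk|hk|hk|hk|hk <;>
    · rw [pvOUT_expand 5 cs (by omega) (by omega)]
      unfold pvBodyA
      simp [hk, PySem.Dict.get?, PySem.Dict.ofList, PySem.Dict.update, PySem.Dict.empty,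
        PySem.Dict.insert, PySem.List.slice_toNat, PySem.Chars.join, List.intercalate,
        List.drop_eq_nil_of_le, List.drop_take, List.take_take, pvSpec,
        List.take_of_length_le, List.length_drop]

-- ===== VERDICT (by name: the statement is the Claim_ definition above) =====
theorem auto_format_number_spec : Claim_equal_auto_format_number := by
  intro number _
  unfold Spec_auto_format_number auto_format_number auto_format_number_alt
  exact pv_main (PySem.Int.toChars number)
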